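-- pv_equiv track=rewrite | github.com/LettsDoSomeCoding/advent-of-code-2019 | day1.py | calculateFuel
-- ===== SOURCE A (Python) =====
-- def calculateFuel(mass):
--     fuel = 0
--     if (mass >= 9):
--         fuel = (mass // 3) - 2
--
--     if fuel > 0:
--         fuelsFuel = calculateFuel(fuel)
--         fuel = fuel + fuelsFuel
--
--     return fuel
-- ===== SOURCE B (Python) =====
-- def calculateFuel(mass):
--     total = 0
--     while mass >= 9:
--         mass = mass // 3 - 2
--         total += mass
--     return total
-- ===== Notes on version B (the rewrite author's own statement) =====
-- stated objective: simpler
-- what changed: Replaces the recursive fuel-of-fuel computation with a flat accumulator while-loop (mass >= 9 guarantees a positive next value, so no fuel > 0 guard is needed).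
import Mathlib
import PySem

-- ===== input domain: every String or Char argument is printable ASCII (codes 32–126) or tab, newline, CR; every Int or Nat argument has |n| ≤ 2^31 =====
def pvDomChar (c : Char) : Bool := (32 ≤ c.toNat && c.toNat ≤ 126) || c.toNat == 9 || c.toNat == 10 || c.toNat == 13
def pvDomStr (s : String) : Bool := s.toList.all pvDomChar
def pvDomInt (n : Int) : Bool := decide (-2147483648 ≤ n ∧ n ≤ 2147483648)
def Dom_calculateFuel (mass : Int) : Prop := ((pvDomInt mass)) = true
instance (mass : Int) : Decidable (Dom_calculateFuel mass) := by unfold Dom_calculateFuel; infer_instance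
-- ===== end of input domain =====

-- B replaces A's recursion on the computed fuel by a flat accumulator loop; objective: simpler.


-- termination fact for both ports: the next mass value decreases
theorem pvFuelStep_lt (mass : Int) (h : mass ≥ 9) :
    (PySem.Int.floordiv mass 3 - 2).toNat < mass.toNat := by
  rw [PySem.Int.floordiv_eq_ediv_of_pos (by norm_num)]
  omega

-- ===== PORT A =====
def calculateFuel (mass : Int) : Int :=
  let fuel : Int := if mass ≥ 9 then PySem.Int.floordiv mass 3 - 2 else 0
  if h : fuel > 0 then
    -- fuel > 0 forces mass ≥ 9 (else fuel = 0), so fuel < mass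
    fuel + calculateFuel fuel
  else
    fuel
termination_by mass.toNat
decreasing_by
  simp only [fuel] at h ⊢
  by_cases hm : mass ≥ 9
  · rw [dif_pos hm]; exact pvFuelStep_lt mass hm
  · rw [dif_neg hm] at h; omega

-- ===== PORT B =====
def calculateFuelLoop (mass total : Int) : Int :=
  if h : mass ≥ 9 then
    calculateFuelLoop (PySem.Int.floordiv mass 3 - 2)
      (total + (PySem.Int.floordiv mass 3 - 2))
  else total
termination_by mass.toNat
decreasing_by exact pvFuelStep_lt mass h

def calculateFuel_alt (mass : Int) : Int := calculateFuelLoop mass 0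

-- ===== PRECONDITION & SPEC =====
def Spec_calculateFuel (mass : Int) (out : Int) : Prop := out = calculateFuel_alt mass
instance (mass : Int) (out : Int) : Decidable (Spec_calculateFuel mass out) := by unfold Spec_calculateFuel; infer_instance

-- ===== CLAIM (what is proved, stated in full; the proofs are below) =====
def Claim_equal_calculateFuel : Prop := ∀ (mass : Int), Dom_calculateFuel mass → Spec_calculateFuel mass (calculateFuel mass)

-- ===== LEMMAS AND PROOFS =====

theorem fuel_pos_iff (mass : Int) (h : mass ≥ 9) : PySem.Int.floordiv mass 3 - 2 > 0 := by
  rw [PySem.Int.floordiv_eq_ediv_of_pos (by norm_num)]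
  omega

theorem loop_eq (mass total : Int) : calculateFuelLoop mass total = total + calculateFuel mass := by
  by_cases h : mass ≥ 9
  · rw [calculateFuelLoop, dif_pos h, calculateFuel]
    simp only [if_pos h]
    rw [dif_pos (fuel_pos_iff mass h)]
    rw [loop_eq (PySem.Int.floordiv mass 3 - 2) (total + (PySem.Int.floordiv mass 3 - 2))]
    ring
  · rw [calculateFuelLoop, calculateFuel]
    have : ¬ ((if mass ≥ 9 then PySem.Int.floordiv mass 3 - 2 else 0) > 0) := by
      rw [if_neg h]; omega
    rw [dif_neg h, dif_neg this, if_neg h]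
    ring
termination_by mass.toNat
decreasing_by exact pvFuelStep_lt mass h

-- ===== VERDICT (by name: the statement is the Claim_ definition above) =====
theorem calculateFuel_spec : Claim_equal_calculateFuel := by
  intro mass _
  unfold Spec_calculateFuel calculateFuel_alt
  rw [loop_eq]
  ring
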